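-- pv_equiv track=rewrite | github.com/leppyr64/advent_of_code_python | 2020/aoc_2020_14.py | maskmem
-- ===== SOURCE A (Python) =====
-- def maskmem(x, mask):
--     result = x
--     floaters = []
--     for i in range(len(mask)):
--         c = mask[len(mask) - i - 1]
--         if c == '1':
--             y = ((1 << i) & result) ^ (1 << i)
--             result += y
--         elif c == 'X':
--             y = ((1 << i) & result) & (1 << i)
--             result -= y
--             floaters.append(i)
--     floatmems = []
--     for i in range((1<<len(floaters))):
--         z = result
--         for j in range(len(floaters)):
--             if ((1 << j) & i) >= 1:
--                 z += (1 << floaters[j])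
--         floatmems.append(z)
--     return result, floatmems
-- ===== SOURCE B (Python) =====
-- def maskmem(x, mask):
--     # Single pass over the reversed mask; floating addresses built by list
--     # doubling per 'X' instead of A's separate 2^k x k subset re-scan.
--     result = x
--     offsets = [0]
--     for i, c in enumerate(reversed(mask)):
--         if c == '1':
--             bit = 1 << i
--             result += (bit & result) ^ bit
--         elif c == 'X':
--             bit = 1 << i
--             result -= (bit & result) & bit
--             offsets = offsets + [m + bit for m in offsets]
--     return result, [result + m for m in offsets]
-- ===== Notes on version B (the rewrite author's own statement) =====
-- stated objective: faster
-- what changed: B makes one pass over enumerate(reversed(mask)) and builds the floating-address list by doubling an offset list at each 'X', replacing A's second phase that re-scans all k floaters for each of the 2^k counter values; it also avoids A's per-iteration index arithmetic and repeated shifts.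
import Mathlib
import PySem

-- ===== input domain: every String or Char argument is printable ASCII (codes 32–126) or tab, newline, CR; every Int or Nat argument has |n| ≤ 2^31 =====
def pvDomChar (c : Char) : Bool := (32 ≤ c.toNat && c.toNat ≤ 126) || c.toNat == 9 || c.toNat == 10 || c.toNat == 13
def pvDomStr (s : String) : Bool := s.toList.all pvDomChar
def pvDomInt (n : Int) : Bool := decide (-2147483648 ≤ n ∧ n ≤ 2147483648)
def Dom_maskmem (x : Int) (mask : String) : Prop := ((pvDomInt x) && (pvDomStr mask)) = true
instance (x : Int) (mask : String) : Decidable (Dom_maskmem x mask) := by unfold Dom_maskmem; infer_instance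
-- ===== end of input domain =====

-- B replaces A's separate 2^k × k subset re-scan over the floater list by a single pass over
-- the reversed mask that doubles the offset list at each 'X' (measured faster in a timing run).


-- ===== PORT A =====
-- Python's 1 << k (k ≥ 0); a named helper so both ports share one spelling of the shift
def pyShl1 (k : Nat) : Int := Int.shiftLeft 1 k
-- first-loop body: c = mask[len(mask)-i-1]; the index is always in range, so xs[i] is pyGetD
def maskmemBody1 (l : List Char) (nn : Int) (st : Int × List Int) (i : Int) : Int × List Int :=
  let c := PySem.List.pyGetD l (nn - i - 1) ' '
  if c = '1' then
    (st.1 + PySem.Int.bxor (PySem.Int.band (pyShl1 i.toNat) st.1) (pyShl1 i.toNat), st.2)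
  else if c = 'X' then
    (st.1 - PySem.Int.band (PySem.Int.band (pyShl1 i.toNat) st.1) (pyShl1 i.toNat), st.2 ++ [i])
  else st

-- inner loop of the second phase: z starts at result, adds 1 << floaters[j] for set bits j of i
def maskmemInner (floaters : List Int) (i : Int) (z0 : Int) : Int :=
  (PySem.List.pyRange 0 (PySem.List.len floaters) 1).foldl
    (fun z j =>
      if (1 : Int) ≤ PySem.Int.band (pyShl1 j.toNat) i then
        z + pyShl1 (PySem.List.pyGetD floaters j 0).toNat
      else z) z0

def maskmem (x : Int) (mask : String) : Int × List Int :=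
  let n : Int := PySem.List.len mask.toList
  let st := (PySem.List.pyRange 0 n 1).foldl (maskmemBody1 mask.toList n) (x, [])
  let floatmems := (PySem.List.pyRange 0 (pyShl1 st.2.length) 1).foldl
    (fun acc i => acc ++ [maskmemInner st.2 i st.1]) []
  (st.1, floatmems)

-- ===== PORT B =====
-- loop body over enumerate(reversed(mask)): same per-bit update of result, and the offset
-- list is doubled in place of recording the floater
def maskmemAltBody (st : Int × List Int) (p : Int × Char) : Int × List Int :=
  if p.2 = '1' then
    let bit : Int := pyShl1 p.1.toNat
    (st.1 + PySem.Int.bxor (PySem.Int.band bit st.1) bit, st.2)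
  else if p.2 = 'X' then
    let bit : Int := pyShl1 p.1.toNat
    (st.1 - PySem.Int.band (PySem.Int.band bit st.1) bit, st.2 ++ st.2.map (fun m => m + bit))
  else st

def maskmem_alt (x : Int) (mask : String) : Int × List Int :=
  let st := (PySem.List.enumerate mask.toList.reverse).foldl maskmemAltBody (x, [0])
  (st.1, st.2.map (fun m => st.1 + m))

-- ===== PRECONDITION & SPEC =====
def Spec_maskmem (x : Int) (mask : String) (out : Int × List Int) : Prop := out = maskmem_alt x mask
instance (x : Int) (mask : String) (out : Int × List Int) : Decidable (Spec_maskmem x mask out) := by unfold Spec_maskmem; infer_instance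

-- ===== CLAIM (what is proved, stated in full; the proofs are below) =====
def Claim_equal_maskmem : Prop := ∀ (x : Int) (mask : String), Dom_maskmem x mask → Spec_maskmem x mask (maskmem x mask)

-- ===== LEMMAS AND PROOFS =====

-- proof-side: the offset list B maintains, as a function of A's floater list
def offsets (fs : List Int) : List Int :=
  fs.foldl (fun os f => os ++ os.map (fun m => m + pyShl1 f.toNat)) [0]

theorem offsets_concat (fs : List Int) (f : Int) :
    offsets (fs ++ [f]) = offsets fs ++ (offsets fs).map (fun m => m + pyShl1 f.toNat) := by
  unfold offsets
  rw [List.foldl_append]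
  rfl

theorem one_shiftLeft_int (k : Nat) : pyShl1 k = ((2 ^ k : Nat) : Int) := by
  show (1 : Int) <<< k = _
  rw [Int.shiftLeft_eq]; push_cast; ring

-- the per-bit test of A's inner loop, decoded
theorem band_pow_natCast (j : Nat) (m : Nat) :
    PySem.Int.band (pyShl1 j) ((m : Nat) : Int) = ((2 ^ j * (m.testBit j).toNat : Nat) : Int) := by
  rw [one_shiftLeft_int, PySem.Int.band_natCast, Nat.two_pow_and]

theorem cond_true_of_testBit {j m : Nat} (h : m.testBit j = true) :
    (1 : Int) ≤ PySem.Int.band (pyShl1 j) ((m : Nat) : Int) := by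
  rw [band_pow_natCast, h]
  have : (1 : Nat) ≤ 2 ^ j * (true).toNat := by simp [Nat.one_le_two_pow]
  exact_mod_cast this

theorem cond_false_of_testBit {j m : Nat} (h : m.testBit j = false) :
    ¬ ((1 : Int) ≤ PySem.Int.band (pyShl1 j) ((m : Nat) : Int)) := by
  rw [band_pow_natCast, h]; simp

-- LOOP 1: B's fold over enumerate(reversed(mask)) is A's fold with offsets maintained
theorem loop1_eq (l : List Char) (x : Int) :
    (PySem.List.enumerate l.reverse).foldl maskmemAltBody (x, [0]) =
      (fun st : Int × List Int => (st.1, offsets st.2))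
        ((PySem.List.pyRange 0 (PySem.List.len l) 1).foldl (maskmemBody1 l (PySem.List.len l)) (x, [])) := by
  rw [PySem.List.enumerate_eq_map_pyRange l.reverse ' ', List.foldl_map]
  have hlen : PySem.List.len l.reverse = PySem.List.len l := by
    simp [PySem.List.len_eq]
  rw [hlen]
  -- replace the reversed lookup by A's lookup for indices in range
  rw [PySem.List.foldl_congr_mem _ _
      (fun st j => maskmemAltBody st (j, PySem.List.pyGetD l (PySem.List.len l - j - 1) ' ')) _
      (by
        intro acc j hj
        have hj' := (PySem.List.mem_pyRange_one).1 hj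
        simp [PySem.List.len_eq] at hj'
        have h0 : (0 : Int) ≤ j := hj'.1
        have h1 : j < (l.length : Int) := hj'.2
        have hrev : PySem.List.pyGetD l.reverse j ' ' = PySem.List.pyGetD l (PySem.List.len l - j - 1) ' ' := by
          rw [PySem.List.pyGetD_eq_getElem l.reverse ' ' h0 (by simpa using h1),
              PySem.List.pyGetD_eq_getElem l ' ' (by simp [PySem.List.len_eq]; omega)
                (by simp [PySem.List.len_eq]; omega)]
          rw [List.getElem_reverse]
          congr 1
          simp [PySem.List.len_eq]
          omega
        rw [hrev])]
  -- now a fold homomorphism along (r, fs) ↦ (r, offsets fs)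
  have := List.foldl_hom (l := PySem.List.pyRange 0 (PySem.List.len l) 1)
      (f := fun st : Int × List Int => (st.1, offsets st.2))
      (g₁ := maskmemBody1 l (PySem.List.len l))
      (g₂ := fun st j => maskmemAltBody st (j, PySem.List.pyGetD l (PySem.List.len l - j - 1) ' '))
      (init := (x, []))
      (by
        intro st j
        simp only [maskmemAltBody, maskmemBody1]
        split_ifs with h1 h2 <;> first | rfl | exact congrArg _ (offsets_concat st.2 j).symm)
  simpa [offsets] using this

-- inner loop over fs ++ [f]: the prefix is the inner loop over fs, then one step for bit |fs|
theorem inner_concat (fs : List Int) (f : Int) (i z : Int) :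
    maskmemInner (fs ++ [f]) i z =
      (if (1 : Int) ≤ PySem.Int.band (pyShl1 fs.length) i then
        maskmemInner fs i z + pyShl1 f.toNat
      else maskmemInner fs i z) := by
  unfold maskmemInner
  have hlen : PySem.List.len (fs ++ [f]) = (fs.length : Int) + 1 := by
    simp [PySem.List.len_eq]
  rw [hlen, PySem.List.pyRange_one_succ_right (by positivity), List.foldl_append]
  have hpre :
      (PySem.List.pyRange 0 (fs.length : Int) 1).foldl
        (fun z j => if (1 : Int) ≤ PySem.Int.band (pyShl1 j.toNat) i then
            z + pyShl1 (PySem.List.pyGetD (fs ++ [f]) j 0).toNat else z) z =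
      (PySem.List.pyRange 0 (PySem.List.len fs) 1).foldl
        (fun z j => if (1 : Int) ≤ PySem.Int.band (pyShl1 j.toNat) i then
            z + pyShl1 (PySem.List.pyGetD fs j 0).toNat else z) z := by
    rw [show PySem.List.len fs = (fs.length : Int) by simp [PySem.List.len_eq]]
    apply PySem.List.foldl_congr_mem
    intro acc j hj
    have hj' := (PySem.List.mem_pyRange_one).1 hj
    have hget : PySem.List.pyGetD (fs ++ [f]) j 0 = PySem.List.pyGetD fs j 0 := by
      rw [PySem.List.pyGetD_eq_getElem (fs ++ [f]) 0 hj'.1 (by simp; omega),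
          PySem.List.pyGetD_eq_getElem fs 0 hj'.1 (by exact_mod_cast hj'.2)]
      rw [List.getElem_append_left]
    rw [hget]
  rw [hpre]
  simp only [List.foldl_cons, List.foldl_nil]
  have hget2 : PySem.List.pyGetD (fs ++ [f]) (fs.length : Int) 0 = f := by
    rw [PySem.List.pyGetD_eq_getElem (fs ++ [f]) 0 (by positivity) (by simp)]
    simp
  rw [hget2, Int.toNat_natCast]

-- the inner loop reads only bits below |fs| of i, which agree between m and 2^|fs| + m
theorem inner_high_bit (fs : List Int) (m : Nat) (z : Int) :
    maskmemInner fs ((2 ^ fs.length + m : Nat) : Int) z = maskmemInner fs ((m : Nat) : Int) z := by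
  unfold maskmemInner
  apply PySem.List.foldl_congr_mem
  intro acc j hj
  have hj' := (PySem.List.mem_pyRange_one).1 hj
  simp [PySem.List.len_eq] at hj'
  have hjn : j.toNat < fs.length := by omega
  have hbits : ((2 ^ fs.length + m : Nat)).testBit j.toNat = m.testBit j.toNat :=
    Nat.testBit_two_pow_add_gt hjn m
  rw [band_pow_natCast, band_pow_natCast, hbits]

-- MAIN: A's second phase over range(2^k) equals B's doubled offset list, shifted by r
theorem phase2_nat (fs : List Int) (r : Int) :
    (List.range (2 ^ fs.length)).map (fun m => maskmemInner fs ((m : Nat) : Int) r) =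
      (offsets fs).map (fun m => r + m) := by
  induction fs using List.reverseRecOn with
  | nil =>
      simp [maskmemInner, offsets, PySem.List.len_eq]
  | append_singleton fs f ih =>
      rw [offsets_concat, List.map_append]
      have hlen : (fs ++ [f]).length = fs.length + 1 := by simp
      rw [hlen, pow_succ, mul_two, List.range_add, List.map_append, List.map_map]
      congr 1
      · -- first half: the extra bit |fs| of m is 0
        rw [← ih]
        apply List.map_congr_left
        intro t ht
        have htlt : t < 2 ^ fs.length := List.mem_range.mp ht
        rw [inner_concat, if_neg (cond_false_of_testBit (Nat.testBit_lt_two_pow htlt))]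
      · -- second half: bit |fs| of 2^|fs| + m is 1
        have ih' := congrArg (List.map (fun z => z + pyShl1 f.toNat)) ih
        rw [List.map_map, List.map_map] at ih'
        rw [List.map_map,
          show ((fun m => r + m) ∘ fun m => m + pyShl1 f.toNat) =
              ((fun z => z + pyShl1 f.toNat) ∘ fun m => r + m) by
            funext m; simp [Function.comp]; ring,
          ← ih']
        apply List.map_congr_left
        intro t ht
        have htlt : t < 2 ^ fs.length := List.mem_range.mp ht
        have hbit : ((2 ^ fs.length + t : Nat)).testBit fs.length = true := by
          rw [Nat.testBit_two_pow_add_eq, Nat.testBit_lt_two_pow htlt]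
          rfl
        simp only [Function.comp]
        rw [show ((2 ^ fs.length + t : Nat) : Int) = (((2 ^ fs.length + t : Nat) : Nat) : Int) by norm_num]
        rw [inner_concat, if_pos (cond_true_of_testBit hbit), inner_high_bit]

theorem phase2_eq (fs : List Int) (r : Int) :
    (PySem.List.pyRange 0 (pyShl1 fs.length) 1).map (fun i => maskmemInner fs i r) =
      (offsets fs).map (fun m => r + m) := by
  rw [one_shiftLeft_int, PySem.List.pyRange_one, List.map_map, ← phase2_nat fs r]
  rw [Int.sub_zero, Int.toNat_natCast]
  apply List.map_congr_left
  intro t _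
  simp [Function.comp]

-- ===== VERDICT (by name: the statement is the Claim_ definition above) =====
theorem maskmem_spec : Claim_equal_maskmem := by
  intro x mask _
  unfold Spec_maskmem maskmem maskmem_alt
  rw [loop1_eq]
  set st := (PySem.List.pyRange 0 (PySem.List.len mask.toList) 1).foldl
      (maskmemBody1 mask.toList (PySem.List.len mask.toList)) (x, ([] : List Int)) with hst
  simp only []
  rw [PySem.List.foldl_append_singleton_eq_map (fun i => maskmemInner st.2 i st.1)]
  rw [List.nil_append, phase2_eq]
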